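-- pv_equiv track=rewrite | github.com/maxim-mat/trace-denoise | src/sktr_update/classes.py | find_longest_prefix
-- ===== SOURCE A (Python) =====
-- from typing import Dict, List, Set, Tuple, Union, Optional, Any
--
-- def find_longest_prefix(
--
--     path_prefix_tuple: Tuple[str, ...],
--     prob_dict: Dict[Tuple[str, ...], Any],
--     max_length: Optional[int] = None
-- ) -> Optional[Tuple[str, ...]]:
--     """
--     Find longest prefix that exists in dictionary.
--
--     Parameters
--     ----------
--     path_prefix_tuple : tuple of str
--         Complete path to search in
--     prob_dict : dict
--         Dictionary to search for prefixes
--     max_length : int, optional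
--         Maximum prefix length to consider
--
--     Returns
--     -------
--     tuple or None
--         Longest existing prefix, or None if not found
--     """
--     max_len = len(path_prefix_tuple)
--     if max_length is not None:
--         max_len = min(max_len, max_length)
--
--     for length in range(max_len, 0, -1):
--         prefix = path_prefix_tuple[-length:]
--         if prefix in prob_dict:
--             return prefix
--
--     return None
-- ===== SOURCE B (Python) =====
-- def find_longest_prefix(path_prefix_tuple, prob_dict, max_length=None):
--     max_len = len(path_prefix_tuple)
--     if max_length is not None:
--         max_len = min(max_len, max_length)
--     best = None
--     for key in prob_dict:
--         L = len(key)
--         if L < 1 or L > max_len: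
--             continue
--         if key != path_prefix_tuple[len(path_prefix_tuple) - L:]:
--             continue
--         if best is None or L > len(best):
--             best = key
--     return best
-- ===== Notes on version B (the rewrite author's own statement) =====
-- stated objective: alternative
-- what changed: B makes one pass over the dict's keys keeping the longest key that is a suffix of the path within the length cap, instead of A's loop that generates successively shorter suffixes of the path and tests each for dict membership.
import Mathlib
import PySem

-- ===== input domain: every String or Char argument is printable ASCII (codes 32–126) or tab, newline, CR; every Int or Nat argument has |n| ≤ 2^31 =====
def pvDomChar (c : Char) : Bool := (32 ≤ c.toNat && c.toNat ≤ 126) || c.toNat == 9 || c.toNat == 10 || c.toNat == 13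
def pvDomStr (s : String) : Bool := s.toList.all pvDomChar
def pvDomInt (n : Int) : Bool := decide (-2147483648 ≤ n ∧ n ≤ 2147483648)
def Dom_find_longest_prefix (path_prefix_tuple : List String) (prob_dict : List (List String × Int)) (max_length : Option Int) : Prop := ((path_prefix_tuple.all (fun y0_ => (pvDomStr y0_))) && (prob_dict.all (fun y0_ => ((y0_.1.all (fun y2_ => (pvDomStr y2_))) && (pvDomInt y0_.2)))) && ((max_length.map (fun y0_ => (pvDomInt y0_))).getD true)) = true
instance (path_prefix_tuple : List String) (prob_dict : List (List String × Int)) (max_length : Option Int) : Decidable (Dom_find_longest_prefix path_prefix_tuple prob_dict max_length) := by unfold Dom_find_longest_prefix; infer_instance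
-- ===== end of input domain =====

-- B scans the dict's keys once and keeps the longest key that is a qualifying suffix, instead of
-- A's generate-suffixes-by-descending-length-and-test-membership loop (objective: alternative).

-- ===== PORT A =====
-- the 'for length in range(max_len, 0, -1): …' countdown loop, length = j
def pvALoop (path_prefix_tuple : List String) (prob_dict : List (List String × Int)) : Nat → Option (List String)
  | 0 => none
  | j+1 =>
    let pfx := PySem.List.slice path_prefix_tuple (some (-((j : Int) + 1))) none   -- path_prefix_tuple[-length:]
    if (prob_dict.map Prod.fst).contains pfx then some pfx                        -- prefix in prob_dict
    else pvALoop path_prefix_tuple prob_dict j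

def find_longest_prefix (path_prefix_tuple : List String) (prob_dict : List (List String × Int)) (max_length : Option Int) : Option (List String) :=
  let maxLen : Int := path_prefix_tuple.length
  let maxLen : Int := match max_length with
    | some m => min maxLen m
    | none => maxLen
  pvALoop path_prefix_tuple prob_dict maxLen.toNat

-- ===== PORT B =====
-- the body of B's 'for key in prob_dict' loop
def pvBStep (path_prefix_tuple : List String) (maxLen : Int) (best : Option (List String)) (p : List String × Int) : Option (List String) :=
  let L : Int := p.1.length
  if L < 1 ∨ maxLen < L then best
  else if p.1 ≠ PySem.List.slice path_prefix_tuple (some ((path_prefix_tuple.length : Int) - L)) none then best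
  else match best with
    | none => some p.1
    | some b => if (b.length : Int) < L then some p.1 else best

def find_longest_prefix_alt (path_prefix_tuple : List String) (prob_dict : List (List String × Int)) (max_length : Option Int) : Option (List String) :=
  let maxLen : Int := path_prefix_tuple.length
  let maxLen : Int := match max_length with
    | some m => min maxLen m
    | none => maxLen
  prob_dict.foldl (pvBStep path_prefix_tuple maxLen) none

-- ===== PRECONDITION & SPEC =====
def Spec_find_longest_prefix (path_prefix_tuple : List String) (prob_dict : List (List String × Int)) (max_length : Option Int) (out : Option (List String)) : Prop := out = find_longest_prefix_alt path_prefix_tuple prob_dict max_length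
instance (path_prefix_tuple : List String) (prob_dict : List (List String × Int)) (max_length : Option Int) (out : Option (List String)) : Decidable (Spec_find_longest_prefix path_prefix_tuple prob_dict max_length out) := by unfold Spec_find_longest_prefix; infer_instance

-- ===== CLAIM (what is proved, stated in full; the proofs are below) =====
def Claim_equal_find_longest_prefix : Prop := ∀ (path_prefix_tuple : List String) (prob_dict : List (List String × Int)) (max_length : Option Int), Dom_find_longest_prefix path_prefix_tuple prob_dict max_length → Spec_find_longest_prefix path_prefix_tuple prob_dict max_length (find_longest_prefix path_prefix_tuple prob_dict max_length)

-- ===== LEMMAS AND PROOFS =====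

-- the suffix of t of length j (for j ≤ t.length)
def pvSfx (t : List String) (j : Nat) : List String := t.drop (t.length - j)

-- a dict key qualifies: its length L is in [1, ml] and it equals the suffix of that length
def pvQ (t : List String) (ml : Nat) (k : List String) : Bool :=
  decide (1 ≤ k.length ∧ k.length ≤ ml ∧ k = pvSfx t k.length)

-- the length tracked by B's loop, starting from m
def pvBLen (t : List String) (ml : Nat) (m : Nat) (l : List (List String × Int)) : Nat :=
  l.foldl (fun a p => if pvQ t ml p.1 then max a p.1.length else a) m

lemma pvSfx_length (t : List String) (j : Nat) (h : j ≤ t.length) : (pvSfx t j).length = j := by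
  simp [pvSfx]; omega

lemma pvBLen_cons (t : List String) (ml m : Nat) (p : List String × Int) (l : List (List String × Int)) :
    pvBLen t ml m (p :: l) = pvBLen t ml (if pvQ t ml p.1 then max m p.1.length else m) l := by
  simp [pvBLen, List.foldl_cons]

lemma le_pvBLen (t : List String) (ml m : Nat) (l : List (List String × Int)) : m ≤ pvBLen t ml m l := by
  induction l generalizing m with
  | nil => simp [pvBLen]
  | cons p l ih =>
    rw [pvBLen_cons]
    refine le_trans ?_ (ih _)
    split <;> omega

lemma pvBLen_mem (t : List String) (ml m : Nat) (l : List (List String × Int)) :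
    pvBLen t ml m l = m ∨ ∃ p ∈ l, pvQ t ml p.1 = true ∧ p.1.length = pvBLen t ml m l := by
  induction l generalizing m with
  | nil => left; simp [pvBLen]
  | cons p l ih =>
    rw [pvBLen_cons]
    by_cases hq : pvQ t ml p.1 = true
    · rw [if_pos hq]
      rcases ih (max m p.1.length) with h | ⟨p', hp', hq', hl'⟩
      · rcases Nat.le_total m p.1.length with hc | hc
        · right; exact ⟨p, List.mem_cons_self, hq, by rw [h, Nat.max_eq_right hc]⟩
        · left; rw [h, Nat.max_eq_left hc]
      · right; exact ⟨p', List.mem_cons_of_mem _ hp', hq', hl'⟩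
    · rw [if_neg hq]
      rcases ih m with h | ⟨p', hp', hq', hl'⟩
      · left; exact h
      · right; exact ⟨p', List.mem_cons_of_mem _ hp', hq', hl'⟩

lemma pvBLen_ge (t : List String) (ml m : Nat) (l : List (List String × Int))
    (p : List String × Int) (hp : p ∈ l) (hq : pvQ t ml p.1 = true) :
    p.1.length ≤ pvBLen t ml m l := by
  induction l generalizing m with
  | nil => cases hp
  | cons p' l ih =>
    rw [pvBLen_cons]
    rcases List.mem_cons.mp hp with rfl | hp'
    · rw [if_pos hq]
      exact le_trans (le_max_right _ _) (le_pvBLen _ _ _ _)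
    · exact ih _ hp'

lemma pvQ_bounds (t : List String) (ml : Nat) (k : List String) (hq : pvQ t ml k = true) :
    1 ≤ k.length ∧ k.length ≤ ml ∧ k = pvSfx t k.length := by
  simpa [pvQ] using hq

-- the slice in B's loop body is the suffix of length L
lemma pvSlice_sub (t : List String) (L : Nat) (h : L ≤ t.length) :
    PySem.List.slice t (some ((t.length : Int) - (L : Int))) none = pvSfx t L := by
  rw [PySem.List.slice_from t (by omega)]
  have hn : ((t.length : Int) - (L : Int)).toNat = t.length - L := by omega
  rw [hn]; rfl

-- one step of B's fold, on an accumulator representing length m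
lemma pvBStep_eq (t : List String) (maxLen : Int) (hml : maxLen.toNat ≤ t.length)
    (p : List String × Int) (m : Nat) (hm : m = 0 ∨ (1 ≤ m ∧ m ≤ maxLen.toNat)) :
    pvBStep t maxLen (if m = 0 then none else some (pvSfx t m)) p =
      (if (if pvQ t maxLen.toNat p.1 then max m p.1.length else m) = 0 then none
       else some (pvSfx t (if pvQ t maxLen.toNat p.1 then max m p.1.length else m))) := by
  by_cases hq : pvQ t maxLen.toNat p.1 = true
  · obtain ⟨h1, h2, h3⟩ := pvQ_bounds t maxLen.toNat p.1 hq
    rw [if_pos hq]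
    unfold pvBStep
    rw [if_neg (by omega)]
    rw [pvSlice_sub t p.1.length (by omega)]
    rw [if_neg (by simpa using h3)]
    rcases Nat.eq_zero_or_pos m with rfl | hm1
    · rw [if_pos rfl, Nat.max_eq_right (Nat.zero_le _)]
      rw [if_neg (by omega), ← h3]
    · rw [if_neg (by omega)]
      have hmle : m ≤ t.length := by omega
      by_cases hlt : m < p.1.length
      · rw [Nat.max_eq_right (by omega)]
        show (if ((pvSfx t m).length : Int) < (p.1.length : Int) then some p.1
              else some (pvSfx t m)) = _
        rw [if_pos (by rw [pvSfx_length t m hmle]; omega)]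
        rw [if_neg (by omega), ← h3]
      · rw [Nat.max_eq_left (by omega)]
        show (if ((pvSfx t m).length : Int) < (p.1.length : Int) then some p.1
              else some (pvSfx t m)) = _
        rw [if_neg (by rw [pvSfx_length t m hmle]; omega)]
        rw [if_neg (by omega)]
  · rw [if_neg hq]
    unfold pvBStep
    by_cases hpass : ((p.1.length : Int) < 1 ∨ maxLen < (p.1.length : Int))
    · rw [if_pos hpass]
    · rw [if_neg hpass]
      push Not at hpass
      have hlen1 : 1 ≤ p.1.length := by omega
      have hlen2 : p.1.length ≤ maxLen.toNat := by omega
      rw [pvSlice_sub t p.1.length (by omega)]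
      rw [if_pos]
      intro h3
      exact hq (by rw [pvQ, decide_eq_true_eq]; exact ⟨hlen1, hlen2, h3⟩)

-- B's fold computes the suffix of the maximal qualifying length
lemma pvBfold (t : List String) (maxLen : Int) (hml : maxLen.toNat ≤ t.length)
    (l : List (List String × Int)) (m : Nat) (hm : m = 0 ∨ (1 ≤ m ∧ m ≤ maxLen.toNat)) :
    l.foldl (pvBStep t maxLen) (if m = 0 then none else some (pvSfx t m)) =
      (if pvBLen t maxLen.toNat m l = 0 then none else some (pvSfx t (pvBLen t maxLen.toNat m l))) := by
  induction l generalizing m with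
  | nil => simp [pvBLen]
  | cons p l ih =>
    rw [List.foldl_cons, pvBLen_cons, pvBStep_eq t maxLen hml p m hm]
    refine ih _ ?_
    by_cases hq : pvQ t maxLen.toNat p.1 = true
    · obtain ⟨h1, h2, _⟩ := pvQ_bounds t maxLen.toNat p.1 hq
      rw [if_pos hq]; right; constructor <;> omega
    · rw [if_neg hq]; exact hm

-- A's countdown loop returns the suffix of the same maximal qualifying length
lemma pvAfold (t : List String) (d : List (List String × Int)) (maxLen : Int)
    (hml : maxLen.toNat ≤ t.length) (j : Nat) (hj : j ≤ maxLen.toNat)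
    (hhi : ∀ L : Nat, j < L → L ≤ maxLen.toNat → ((d.map Prod.fst).contains (pvSfx t L)) = false) :
    pvALoop t d j =
      (if pvBLen t maxLen.toNat 0 d = 0 then none else some (pvSfx t (pvBLen t maxLen.toNat 0 d))) := by
  induction j with
  | zero =>
    rcases pvBLen_mem t maxLen.toNat 0 d with h0 | ⟨p, hp, hq, hl⟩
    · rw [h0]; rfl
    · obtain ⟨h1, h2, h3⟩ := pvQ_bounds t maxLen.toNat p.1 hq
      have hc := hhi p.1.length (by omega) h2
      rw [List.contains_eq_mem, decide_eq_false_iff_not] at hc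
      exact absurd (h3 ▸ List.mem_map_of_mem hp) hc
  | succ j ih =>
    unfold pvALoop
    have hcast : (-((j : Int) + 1)) = -(((j+1 : Nat)) : Int) := by push_cast; ring
    rw [hcast, PySem.List.slice_from_neg_natCast t (j+1) (by omega)]
    have hsfx : List.drop (t.length - (j+1)) t = pvSfx t (j+1) := rfl
    rw [hsfx]
    have hlsfx : (pvSfx t (j+1)).length = j + 1 := pvSfx_length t (j+1) (by omega)
    by_cases hc : ((d.map Prod.fst).contains (pvSfx t (j+1))) = true
    · rw [if_pos hc]
      rw [List.contains_eq_mem, decide_eq_true_eq] at hc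
      obtain ⟨p, hp, hpk⟩ := List.mem_map.mp hc
      have hplen : p.1.length = j + 1 := by rw [hpk, hlsfx]
      have hq : pvQ t maxLen.toNat p.1 = true := by
        rw [pvQ, decide_eq_true_eq]
        exact ⟨by omega, by omega, by rw [hplen]; exact hpk⟩
      have hge : j + 1 ≤ pvBLen t maxLen.toNat 0 d := by
        have := pvBLen_ge t maxLen.toNat 0 d p hp hq
        omega
      have hle : pvBLen t maxLen.toNat 0 d ≤ j + 1 := by
        rcases pvBLen_mem t maxLen.toNat 0 d with h0 | ⟨p', hp', hq', hl'⟩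
        · omega
        · obtain ⟨h1', h2', h3'⟩ := pvQ_bounds t maxLen.toNat p'.1 hq'
          by_contra hgt
          have hcf := hhi p'.1.length (by omega) h2'
          rw [List.contains_eq_mem, decide_eq_false_iff_not] at hcf
          exact hcf (h3' ▸ List.mem_map_of_mem hp')
      have heq : pvBLen t maxLen.toNat 0 d = j + 1 := by omega
      rw [heq, if_neg (by omega)]
    · rw [if_neg hc]
      refine ih (by omega) (fun L hL1 hL2 => ?_)
      rcases Nat.lt_or_ge (j+1) L with h | h
      · exact hhi L h hL2
      · have hLe : L = j + 1 := by omega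
        subst hLe
        simpa using hc

-- the two loops agree, for any maxLen with maxLen.toNat ≤ t.length
lemma pvMain (t : List String) (d : List (List String × Int)) (maxLen : Int)
    (hml : maxLen.toNat ≤ t.length) :
    pvALoop t d maxLen.toNat = d.foldl (pvBStep t maxLen) none := by
  have hB := pvBfold t maxLen hml d 0 (Or.inl rfl)
  rw [if_pos rfl] at hB
  rw [hB]
  exact pvAfold t d maxLen hml maxLen.toNat le_rfl (fun L h1 h2 => absurd h2 (by omega))

-- ===== VERDICT (by name: the statement is the Claim_ definition above) =====
theorem find_longest_prefix_spec : Claim_equal_find_longest_prefix := by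
  intro t d mx _
  unfold Spec_find_longest_prefix find_longest_prefix find_longest_prefix_alt
  rcases mx with _ | m
  · exact pvMain t d (t.length : Int) (by omega)
  · refine pvMain t d (min (t.length : Int) m) ?_
    have := min_le_left ((t.length : Int)) m
    omega
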